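-- pv_equiv track=rewrite | github.com/jkjan/PS | SW Expert/진짜 BFS.py | get_common_parent
-- ===== SOURCE A (Python) =====
-- def get_common_parent(a, b, parents):
--     visited_as_parent = {}
--     load_to_parent_a = 0
--     load_a_from_b = 0
--
--     while a != -1:
--         visited_as_parent[a] = load_to_parent_a
--         a = parents[a]
--         load_to_parent_a += 1
--
--     load_to_parent_b = 0
--     while b != -1:
--         if b in visited_as_parent.keys():
--             load_a_from_b = visited_as_parent[b] + load_to_parent_b
--             break
--
--         b = parents[b]
--         load_to_parent_b += 1
--
--     return load_a_from_b
-- ===== SOURCE B (Python) =====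
-- def get_common_parent(a, b, parents):
--     # Different algorithm: materialize both root-ward paths, strip their common
--     # suffix, and return the closed-form distance |ca| + |cb| - 2*k.
--     def chain(x):
--         c = []
--         while x != -1:
--             c.append(x)
--             x = parents[x]
--         return c
--
--     ca = chain(a)
--     cb = chain(b)
--     ra = ca[::-1]
--     rb = cb[::-1]
--     k = 0
--     while k < len(ra) and k < len(rb) and ra[k] == rb[k]:
--         k += 1
--     return 0 if k == 0 else len(ca) + len(cb) - 2 * k
-- ===== Notes on version B (the rewrite author's own statement) =====
-- stated objective: alternative
-- what changed: A walks a's ancestors into a hash map and then scans b's ancestors for the first hit; B materializes both root-ward paths as lists, strips their longest common suffix by a reversed common-prefix scan, and returns the closed-form distance len(ca)+len(cb)-2*k (0 when the paths are disjoint).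
import Mathlib
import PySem

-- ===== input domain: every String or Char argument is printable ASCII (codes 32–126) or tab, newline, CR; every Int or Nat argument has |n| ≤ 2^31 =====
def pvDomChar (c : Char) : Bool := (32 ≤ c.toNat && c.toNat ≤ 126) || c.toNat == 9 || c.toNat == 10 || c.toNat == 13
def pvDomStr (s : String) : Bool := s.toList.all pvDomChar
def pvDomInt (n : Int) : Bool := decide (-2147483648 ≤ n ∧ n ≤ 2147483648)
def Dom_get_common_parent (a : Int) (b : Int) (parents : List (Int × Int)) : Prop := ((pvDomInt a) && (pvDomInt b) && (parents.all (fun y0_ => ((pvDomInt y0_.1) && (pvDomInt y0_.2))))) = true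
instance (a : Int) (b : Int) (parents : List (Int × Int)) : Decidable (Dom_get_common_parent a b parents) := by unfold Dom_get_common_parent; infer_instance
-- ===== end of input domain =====

-- B replaces A's hash-map-of-ancestors + membership scan by materializing both
-- root-ward paths and stripping their longest common suffix (same cost, different algorithm).

-- first-match association lookup: Python's parents[x] on a dict (none = KeyError)
def pvLookup (parents : List (Int × Int)) (x : Int) : Option Int :=
  (parents.find? (fun q => decide (q.1 = x))).map (·.2)

-- ===== PORT A =====
-- first while loop: visited_as_parent[a] = load; a = parents[a]; load += 1
-- (fuel is a totality guard only; Pre_ proves it never runs out)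
def gcpVisit (parents : List (Int × Int)) : Nat → Int → Int → PySem.Dict Int Int → PySem.Dict Int Int
  | 0, _, _, vis => vis
  | f + 1, a, load, vis =>
      if a = -1 then vis
      else
        match pvLookup parents a with
        | none => vis.insert a load        -- KeyError point (outside Pre_)
        | some p => gcpVisit parents f p (load + 1) (vis.insert a load)

-- second while loop: break with visited[b] + load_b on the first hit, else fall out with 0
def gcpFind (parents : List (Int × Int)) : Nat → Int → Int → PySem.Dict Int Int → Int
  | 0, _, _, _ => 0
  | f + 1, b, loadb, vis =>
      if b = -1 then 0
      else if vis.contains b then vis.getD b 0 + loadb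
      else
        match pvLookup parents b with
        | none => 0                         -- KeyError point (outside Pre_)
        | some p => gcpFind parents f p (loadb + 1) vis

def get_common_parent (a : Int) (b : Int) (parents : List (Int × Int)) : Int :=
  gcpFind parents (parents.length + 1) b 0
    (gcpVisit parents (parents.length + 1) a 0 PySem.Dict.empty)

-- ===== PORT B =====
-- chain(x): the root-ward path from x (fuel is a totality guard only)
def gcpChain (parents : List (Int × Int)) : Nat → Int → List Int
  | 0, _ => []
  | f + 1, x =>
      if x = -1 then []
      else
        match pvLookup parents x with
        | none => [x]                       -- KeyError point (outside Pre_)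
        | some p => x :: gcpChain parents f p

-- the k-loop of Source B: common prefix length of the two reversed paths
def gcpCommonPrefixLen : List Int → List Int → Int
  | x :: xs, y :: ys => if x = y then 1 + gcpCommonPrefixLen xs ys else 0
  | _, _ => 0

def get_common_parent_alt (a : Int) (b : Int) (parents : List (Int × Int)) : Int :=
  let ca := gcpChain parents (parents.length + 1) a
  let cb := gcpChain parents (parents.length + 1) b
  let k := gcpCommonPrefixLen ca.reverse cb.reverse
  if k = 0 then 0 else (ca.length : Int) + cb.length - 2 * k

-- ===== PRECONDITION & SPEC =====
-- grounded: the pointer chain from x reaches the root -1 within f steps of the input map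
-- (bounded reachability in the input graph; within parents.length steps is exact, since a
-- terminating chain never repeats a node and visits only keys)
def pvGrounded (parents : List (Int × Int)) : Nat → Int → Bool
  | 0, x => x == -1
  | f + 1, x =>
      x == -1 ||
        (match pvLookup parents x with
         | none => false
         | some p => pvGrounded parents f p)

-- Pre_ excludes inputs where A raises KeyError or loops forever (a chain from a or b that
-- never reaches -1), and duplicate-key association lists, which do not represent any Python
-- dict; every input on which the Python A returns satisfies Pre_.
def Pre_get_common_parent (a : Int) (b : Int) (parents : List (Int × Int)) : Prop :=
  (parents.map Prod.fst).Nodup ∧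
  pvGrounded parents parents.length a = true ∧
  pvGrounded parents parents.length b = true
instance (a : Int) (b : Int) (parents : List (Int × Int)) : Decidable (Pre_get_common_parent a b parents) := by unfold Pre_get_common_parent; infer_instance

def pvWitness_get_common_parent : Int × Int × (List (Int × Int)) := (2, 1, [(1, 0), (2, 0), (0, -1)])

def Spec_get_common_parent (a : Int) (b : Int) (parents : List (Int × Int)) (out : Int) : Prop := out = get_common_parent_alt a b parents
instance (a : Int) (b : Int) (parents : List (Int × Int)) (out : Int) : Decidable (Spec_get_common_parent a b parents out) := by unfold Spec_get_common_parent; infer_instance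

-- ===== CLAIM (what is proved, stated in full; the proofs are below) =====
def Claim_equal_get_common_parent : Prop := ∀ (a : Int) (b : Int) (parents : List (Int × Int)), Dom_get_common_parent a b parents → Pre_get_common_parent a b parents → Spec_get_common_parent a b parents (get_common_parent a b parents)

-- ===== LEMMAS AND PROOFS =====
theorem gcp_witness_pre : Dom_get_common_parent (pvWitness_get_common_parent.1) (pvWitness_get_common_parent.2.1) (pvWitness_get_common_parent.2.2) ∧ Pre_get_common_parent (pvWitness_get_common_parent.1) (pvWitness_get_common_parent.2.1) (pvWitness_get_common_parent.2.2) := by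
  constructor <;> decide

theorem gcpChain_neg_one (parents : List (Int × Int)) (f : Nat) :
    gcpChain parents f (-1) = [] := by
  cases f <;> simp [gcpChain]

theorem pvGrounded_neg_one (parents : List (Int × Int)) (f : Nat) :
    pvGrounded parents f (-1) = true := by
  cases f <;> simp [pvGrounded]

theorem pvGrounded_zero {parents : List (Int × Int)} {x : Int}
    (h : pvGrounded parents 0 x = true) : x = -1 := by
  simpa [pvGrounded] using h

theorem pvGrounded_step {parents : List (Int × Int)} {f : Nat} {x : Int}
    (h : pvGrounded parents (f + 1) x = true) (hx : x ≠ -1) :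
    ∃ p, pvLookup parents x = some p ∧ pvGrounded parents f p = true := by
  simp only [pvGrounded, Bool.or_eq_true, beq_iff_eq] at h
  rcases h with h | h
  · exact absurd h hx
  · cases hp : pvLookup parents x with
    | none => rw [hp] at h; simp at h
    | some p => rw [hp] at h; exact ⟨p, rfl, h⟩

theorem pvGrounded_mono {parents : List (Int × Int)} :
    ∀ {f f' : Nat} {x : Int}, f ≤ f' → pvGrounded parents f x = true →
      pvGrounded parents f' x = true := by
  intro f
  induction f with
  | zero =>
    intro f' x _ h
    rw [pvGrounded_zero h]; exact pvGrounded_neg_one parents f'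
  | succ g ih =>
    intro f' x hle h
    by_cases hx : x = -1
    · subst hx; exact pvGrounded_neg_one parents f'
    obtain ⟨p, hp, hgp⟩ := pvGrounded_step h hx
    obtain ⟨g', rfl⟩ : ∃ g', f' = g' + 1 := ⟨f' - 1, by omega⟩
    simp only [pvGrounded, Bool.or_eq_true, hp]
    exact Or.inr (ih (by omega) hgp)

theorem gcpChain_fuel {parents : List (Int × Int)} :
    ∀ (f : Nat) (x : Int), pvGrounded parents f x = true →
      ∀ (f' f'' : Nat), f ≤ f' → f ≤ f'' →
        gcpChain parents f' x = gcpChain parents f'' x := by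
  intro f
  induction f with
  | zero =>
    intro x h f' f'' _ _
    rw [pvGrounded_zero h, gcpChain_neg_one, gcpChain_neg_one]
  | succ g ih =>
    intro x h f' f'' hle1 hle2
    by_cases hx : x = -1
    · subst hx; rw [gcpChain_neg_one, gcpChain_neg_one]
    obtain ⟨p, hp, hgp⟩ := pvGrounded_step h hx
    obtain ⟨g', rfl⟩ : ∃ g', f' = g' + 1 := ⟨f' - 1, by omega⟩
    obtain ⟨g'', rfl⟩ : ∃ g'', f'' = g'' + 1 := ⟨f'' - 1, by omega⟩
    simp only [gcpChain, if_neg hx, hp]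
    rw [ih p hgp g' g'' (by omega) (by omega)]

theorem gcpChain_cons {parents : List (Int × Int)} {x p : Int}
    (hg : pvGrounded parents parents.length x = true) (hx : x ≠ -1)
    (hp : pvLookup parents x = some p) :
    gcpChain parents (parents.length + 1) x = x :: gcpChain parents (parents.length + 1) p := by
  conv_lhs => rw [gcpChain]
  simp only [if_neg hx, hp]
  congr 1
  cases hl : parents.length with
  | zero =>
    rw [hl] at hg
    exact absurd (pvGrounded_zero hg) hx
  | succ n =>
    rw [hl] at hg
    obtain ⟨p', hp', hgp⟩ := pvGrounded_step hg hx
    rw [hp] at hp'; injection hp' with hpe; subst hpe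
    exact gcpChain_fuel n p hgp _ _ (by omega) (by omega)

theorem gcpChain_suffix {parents : List (Int × Int)} :
    ∀ (f : Nat) (x y : Int), pvGrounded parents f x = true → f ≤ parents.length →
      y ∈ gcpChain parents (f + 1) x →
      gcpChain parents (parents.length + 1) y <:+ gcpChain parents (f + 1) x := by
  intro f
  induction f with
  | zero =>
    intro x y h _ hy
    rw [pvGrounded_zero h, gcpChain_neg_one] at hy
    simp at hy
  | succ g ih =>
    intro x y h hfle hy
    by_cases hx : x = -1
    · subst hx; rw [gcpChain_neg_one] at hy; simp at hy
    obtain ⟨p, hp, hgp⟩ := pvGrounded_step h hx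
    have hunf : gcpChain parents (g + 1 + 1) x = x :: gcpChain parents (g + 1) p := by
      simp [gcpChain, hx, hp]
    rw [hunf] at hy ⊢
    rcases List.mem_cons.mp hy with rfl | hy'
    · have : gcpChain parents (parents.length + 1) y = y :: gcpChain parents (g + 1) p := by
        rw [gcpChain_fuel (g + 1) y (pvGrounded_mono (by omega) h) (parents.length + 1)
          (g + 1 + 1) (by omega) (by omega), hunf]
      rw [this]
    · exact (ih p y hgp (by omega) hy').trans (List.suffix_cons x _)

theorem gcpCpl_nil_right (xs : List Int) : gcpCommonPrefixLen xs [] = 0 := by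
  cases xs <;> simp [gcpCommonPrefixLen]

theorem gcpCpl_prefix : ∀ (p u v : List Int),
    gcpCommonPrefixLen (p ++ u) (p ++ v) = (p.length : Int) + gcpCommonPrefixLen u v := by
  intro p
  induction p with
  | nil => intro u v; simp
  | cons x xs ih => intro u v; simp [gcpCommonPrefixLen, ih u v]; ring

theorem gcpCpl_append_right_of_not_mem {b : Int} :
    ∀ (xs ys : List Int), b ∉ xs →
      gcpCommonPrefixLen xs (ys ++ [b]) = gcpCommonPrefixLen xs ys := by
  intro xs
  induction xs with
  | nil => intro ys _; simp [gcpCommonPrefixLen]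
  | cons x xs ih =>
    intro ys hb
    cases ys with
    | nil =>
      have hxb : x ≠ b := by intro h; exact hb (by simp [h])
      simp [gcpCommonPrefixLen, hxb]
    | cons y ys =>
      simp only [List.cons_append, gcpCommonPrefixLen]
      by_cases hxy : x = y
      · simp [hxy, ih ys (by intro h; exact hb (List.mem_cons_of_mem _ h))]
      · simp [hxy]

theorem gcpVisit_get? {parents : List (Int × Int)} :
    ∀ (f : Nat) (x load : Int) (vis : PySem.Dict Int Int) (y : Int),
      pvGrounded parents f x = true → f ≤ parents.length →
      (gcpVisit parents (f + 1) x load vis).get? y =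
        if y ∈ gcpChain parents (parents.length + 1) x
        then some (load + ((gcpChain parents (parents.length + 1) x).length : Int)
                      - ((gcpChain parents (parents.length + 1) y).length : Int))
        else vis.get? y := by
  intro f
  induction f with
  | zero =>
    intro x load vis y h _
    rw [pvGrounded_zero h, gcpChain_neg_one]
    simp [gcpVisit]
  | succ g ih =>
    intro x load vis y h hfle
    by_cases hx : x = -1
    · subst hx; rw [gcpChain_neg_one]; simp [gcpVisit]
    obtain ⟨p, hp, hgp⟩ := pvGrounded_step h hx
    have hcons := gcpChain_cons (pvGrounded_mono hfle h) hx hp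
    have hstep : gcpVisit parents (g + 1 + 1) x load vis
        = gcpVisit parents (g + 1) p (load + 1) (vis.insert x load) := by
      conv_lhs => rw [gcpVisit]
      simp only [if_neg hx, hp]
    rw [hstep, ih p (load + 1) (vis.insert x load) y hgp (by omega), hcons]
    have hxnp : x ∉ gcpChain parents (parents.length + 1) p := by
      intro hmem
      have hmem' : x ∈ gcpChain parents (g + 1) p := by
        rw [gcpChain_fuel g p hgp (g + 1) (parents.length + 1) (by omega) (by omega)]
        exact hmem
      have hsfx : gcpChain parents (parents.length + 1) x <:+ gcpChain parents (g + 1) p :=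
        gcpChain_suffix g p x hgp (by omega) hmem'
      have hlen := hsfx.length_le
      rw [gcpChain_fuel g p hgp (g + 1) (parents.length + 1) (by omega) (by omega),
        hcons] at hlen
      simp at hlen
    by_cases hyp : y ∈ gcpChain parents (parents.length + 1) p
    · have hyx : y ≠ x := fun h => hxnp (h ▸ hyp)
      simp [hyp, List.mem_cons, hyx]
      ring_nf
    · by_cases hyx : y = x
      · subst hyx
        rw [if_neg hyp, PySem.Dict.get?_insert_self]
        simp [hcons, hyp]
      · rw [if_neg hyp, PySem.Dict.get?_insert_of_ne _ _ hyx]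
        simp [List.mem_cons, hyx, hyp]

theorem gcpFind_neg_one (parents : List (Int × Int)) (f : Nat) (l : Int) (v : PySem.Dict Int Int) :
    gcpFind parents f (-1) l v = 0 := by
  cases f <;> simp [gcpFind]

theorem gcpFind_eq {parents : List (Int × Int)} {a : Int}
    (ha : pvGrounded parents parents.length a = true) :
    ∀ (f : Nat) (b loadb : Int), pvGrounded parents f b = true → f ≤ parents.length →
      gcpFind parents (f + 1) b loadb (gcpVisit parents (parents.length + 1) a 0 PySem.Dict.empty) =
        (if gcpCommonPrefixLen (gcpChain parents (parents.length + 1) a).reverse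
              (gcpChain parents (parents.length + 1) b).reverse = 0 then 0
         else ((gcpChain parents (parents.length + 1) a).length : Int)
              + ((gcpChain parents (parents.length + 1) b).length : Int)
              - 2 * gcpCommonPrefixLen (gcpChain parents (parents.length + 1) a).reverse
                    (gcpChain parents (parents.length + 1) b).reverse + loadb) := by
  intro f
  induction f with
  | zero =>
    intro b loadb h _
    rw [pvGrounded_zero h, gcpFind_neg_one, gcpChain_neg_one]
    simp [gcpCpl_nil_right]
  | succ g ih =>
    intro b loadb h hfle
    by_cases hneg : b = -1
    · subst hneg
      rw [gcpFind_neg_one, gcpChain_neg_one]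
      simp [gcpCpl_nil_right]
    obtain ⟨p, hp, hgp⟩ := pvGrounded_step h hneg
    have hvis := gcpVisit_get? parents.length a 0 PySem.Dict.empty b ha (le_refl _)
    rw [PySem.Dict.get?_empty] at hvis
    have hcons := gcpChain_cons (pvGrounded_mono hfle h) hneg hp
    by_cases hbCA : b ∈ gcpChain parents (parents.length + 1) a
    · -- found: visited[b] + loadb
      rw [if_pos hbCA] at hvis
      have hcont : (gcpVisit parents (parents.length + 1) a 0 PySem.Dict.empty).contains b = true := by
        rw [PySem.Dict.contains_eq_isSome_get?, hvis]; rfl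
      have hLHS : gcpFind parents (g + 1 + 1) b loadb
          (gcpVisit parents (parents.length + 1) a 0 PySem.Dict.empty) =
          (0 + ((gcpChain parents (parents.length + 1) a).length : Int)
            - ((gcpChain parents (parents.length + 1) b).length : Int)) + loadb := by
        conv_lhs => rw [gcpFind]
        simp only [if_neg hneg, hcont, if_true]
        rw [PySem.Dict.getD_eq_get?_getD, hvis]
        rfl
      rw [hLHS]
      obtain ⟨u, hu⟩ := gcpChain_suffix parents.length a b ha (le_refl _) hbCA
      have hk : gcpCommonPrefixLen (gcpChain parents (parents.length + 1) a).reverse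
          (gcpChain parents (parents.length + 1) b).reverse
          = ((gcpChain parents (parents.length + 1) b).length : Int) := by
        have h2 := gcpCpl_prefix (gcpChain parents (parents.length + 1) b).reverse u.reverse []
        rw [List.append_nil] at h2
        rw [← hu, List.reverse_append, h2, gcpCpl_nil_right]
        simp
      rw [hk]
      have hlen : 1 ≤ (gcpChain parents (parents.length + 1) b).length := by
        rw [hcons]; simp
      rw [if_neg (by omega)]
      ring
    · -- not found yet: step to the parent
      rw [if_neg hbCA] at hvis
      have hcont : (gcpVisit parents (parents.length + 1) a 0 PySem.Dict.empty).contains b = false := by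
        rw [PySem.Dict.contains_eq_isSome_get?, hvis]; rfl
      have hLHS : gcpFind parents (g + 1 + 1) b loadb
          (gcpVisit parents (parents.length + 1) a 0 PySem.Dict.empty) =
          gcpFind parents (g + 1) p (loadb + 1)
            (gcpVisit parents (parents.length + 1) a 0 PySem.Dict.empty) := by
        conv_lhs => rw [gcpFind]
        simp only [if_neg hneg, hcont, Bool.false_eq_true, if_false, hp]
      have hk : gcpCommonPrefixLen (gcpChain parents (parents.length + 1) a).reverse
          (gcpChain parents (parents.length + 1) b).reverse
          = gcpCommonPrefixLen (gcpChain parents (parents.length + 1) a).reverse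
            (gcpChain parents (parents.length + 1) p).reverse := by
        rw [hcons, List.reverse_cons]
        exact gcpCpl_append_right_of_not_mem _ _ (by simpa using hbCA)
      rw [hLHS, hk, ih p (loadb + 1) hgp (by omega)]
      have hlen : (gcpChain parents (parents.length + 1) b).length
          = (gcpChain parents (parents.length + 1) p).length + 1 := by
        rw [hcons]; simp
      split_ifs with h0
      · rfl
      · rw [hlen]; push_cast; ring

-- ===== VERDICT (by name: the statement is the Claim_ definition above) =====
theorem get_common_parent_spec : Claim_equal_get_common_parent := by
  intro a b parents _ hPre
  obtain ⟨-, ha, hb⟩ := hPre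
  unfold Spec_get_common_parent get_common_parent
  have halt : get_common_parent_alt a b parents =
      (if gcpCommonPrefixLen (gcpChain parents (parents.length + 1) a).reverse
            (gcpChain parents (parents.length + 1) b).reverse = 0 then 0
       else ((gcpChain parents (parents.length + 1) a).length : Int)
            + ((gcpChain parents (parents.length + 1) b).length : Int)
            - 2 * gcpCommonPrefixLen (gcpChain parents (parents.length + 1) a).reverse
                  (gcpChain parents (parents.length + 1) b).reverse) := rfl
  rw [halt, gcpFind_eq ha parents.length b 0 hb (le_refl _)]
  split_ifs with h0
  · rfl
  · ring
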